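-- pv_equiv track=rewrite | github.com/OpenDCAI/DataFlow-MM | dataflow/operators/core_vision/generate/image_gcot_generator.py | _merge_adjacent_keywords
-- ===== SOURCE A (Python) =====
-- from typing import List, Dict, Tuple, Optional
--
-- def _merge_adjacent_keywords(keywords: List[str], cot_text: str) -> List[str]:
--     """Merge keywords that appear adjacent in CoT"""
--     if len(keywords) <= 1:
--         return keywords
--
--     cot_lower = cot_text.lower()
--     merged = []
--     skip_indices = set()
--
--     for i in range(len(keywords)):
--         if i in skip_indices:
--             continue
--
--         best_match = keywords[i]
--         best_indices = [i]
--
--         # Try forward combinations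
--         for j in range(i + 1, min(i + 4, len(keywords))):
--             if j in skip_indices:
--                 break
--             combined = ' '.join(keywords[i:j+1])
--             if combined.lower() in cot_lower:
--                 best_match = combined
--                 best_indices = list(range(i, j+1))
--             else:
--                 break
--
--         merged.append(best_match)
--         skip_indices.update(best_indices)
--
--     return merged
-- ===== SOURCE B (Python) =====
-- from typing import List
--
-- def _merge_adjacent_keywords(keywords: List[str], cot_text: str) -> List[str]:
--     """Merge keywords that appear adjacent in CoT.
--
--     Staged re-implementation: stage 1 precomputes, for EVERY start index
--     independently, the longest run (at most 4 keywords) whose every prefix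
--     phrase occurs in the lowered CoT, declaratively via max/all; stage 2
--     folds that table into phrases by jumping ahead by the tabled lengths.
--     """
--     low = cot_text.lower()
--     n = len(keywords)
--     reach = [
--         max(k for k in range(1, min(4, n - i) + 1)
--             if all(' '.join(keywords[i:i + t]).lower() in low
--                    for t in range(2, k + 1)))
--         for i in range(n)
--     ]
--     merged = []
--     i = 0
--     while i < n:
--         merged.append(' '.join(keywords[i:i + reach[i]]))
--         i += reach[i]
--     return merged
-- ===== Notes on version B (the rewrite author's own statement) =====
-- stated objective: alternative
-- what changed: Replaces the stateful greedy extend-while loop with skip_indices by two stages: a precomputed per-start table reach[i] (the longest run of at most 4 keywords all of whose prefix joins occur in the lowered CoT, computed declaratively with max/all for every index independently), then a second pass that emits phrases by jumping ahead by the tabled lengths; correct because A's stop-at-first-failure run length equals the maximum k whose every prefix join matches.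
import Mathlib
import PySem

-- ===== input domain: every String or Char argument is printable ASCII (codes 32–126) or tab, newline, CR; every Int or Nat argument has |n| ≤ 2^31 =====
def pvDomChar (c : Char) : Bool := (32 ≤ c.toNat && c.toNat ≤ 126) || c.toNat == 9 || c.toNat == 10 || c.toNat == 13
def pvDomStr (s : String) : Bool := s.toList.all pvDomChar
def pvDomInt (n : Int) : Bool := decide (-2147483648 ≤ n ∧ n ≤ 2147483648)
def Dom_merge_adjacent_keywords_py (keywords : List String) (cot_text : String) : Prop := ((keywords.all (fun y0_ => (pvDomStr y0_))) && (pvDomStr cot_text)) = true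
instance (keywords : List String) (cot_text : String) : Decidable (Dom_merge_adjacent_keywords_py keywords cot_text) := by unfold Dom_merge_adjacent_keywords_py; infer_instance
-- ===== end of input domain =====

-- B replaces the stateful greedy extend-while loop with skip set by two stages:
-- a per-start table of maximal run lengths computed declaratively (max/all),
-- then a pass that jumps through the table emitting the joined phrases.

-- ===== PORT A =====
-- inner 'for j in range(i+1, min(i+4, len(keywords)))' loop with its two breaks
def pvInnerA (keywords : List String) (cot_lower : String) (skip : PySem.Set Int) (i : Int)
    (js : List Int) (best : String) (bestIdx : List Int) : String × List Int :=
  match js with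
  | [] => (best, bestIdx)
  | j :: rest =>
    if PySem.Set.contains skip j then (best, bestIdx)       -- break
    else
      let combined := PySem.Str.join " " (PySem.List.slice keywords (some i) (some (j + 1)))
      if PySem.Str.isIn (PySem.Str.lower combined) cot_lower then
        pvInnerA keywords cot_lower skip i rest combined (PySem.List.pyRange i (j + 1) 1)
      else (best, bestIdx)                                   -- break

-- outer 'for i in range(len(keywords))' loop carrying merged and skip_indices
def pvOuterA (keywords : List String) (cot_lower : String)
    (is : List Int) (merged : List String) (skip : PySem.Set Int) : List String :=
  match is with
  | [] => merged
  | i :: rest =>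
    if PySem.Set.contains skip i then
      pvOuterA keywords cot_lower rest merged skip
    else
      -- keywords[i]: i is drawn from range(len(keywords)), always in range, so getD is exact
      let r := pvInnerA keywords cot_lower skip i
          (PySem.List.pyRange (i + 1) (min (i + 4) (keywords.length : Int)) 1)
          (PySem.List.pyGetD keywords i "") [i]
      pvOuterA keywords cot_lower rest (merged ++ [r.1]) (PySem.Set.update skip r.2)

def merge_adjacent_keywords_py (keywords : List String) (cot_text : String) : List String :=
  if (keywords.length : Int) ≤ 1 then keywords
  else
    pvOuterA keywords (PySem.Str.lower cot_text)
      (PySem.List.pyRange 0 (keywords.length : Int) 1) [] PySem.Set.empty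

-- ===== PORT B =====
-- ' '.join(keywords[i:i+t]).lower() in low
def pvOkB (keywords : List String) (low : String) (i t : Int) : Bool :=
  PySem.Str.isIn (PySem.Str.lower (PySem.Str.join " " (PySem.List.slice keywords (some i) (some (i + t))))) low

-- max(k for k in range(1, min(4, n-i)+1) if all(... for t in range(2, k+1)))
-- the generator always contains k = 1 (the 'all' over an empty range), so the
-- Python max never raises and the .getD 1 default is never used
def pvReach (keywords : List String) (low : String) (i : Int) : Int :=
  (PySem.List.max?
    ((PySem.List.pyRange 1 (min 4 ((keywords.length : Int) - i) + 1) 1).filter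
      (fun k => (PySem.List.pyRange 2 (k + 1) 1).all (fun t => pvOkB keywords low i t)))
    (fun x => x)).getD 1

-- the stage-1 table: reach = [ ... for i in range(n)]
def pvTableB (keywords : List String) (low : String) : List Int :=
  (PySem.List.pyRange 0 (keywords.length : Int) 1).map (pvReach keywords low)

-- termination facts for the stage-2 loop, cited by name in pvConsumeB/alt
theorem pvReach_one_le (keywords : List String) (low : String) (i : Int) :
    1 ≤ pvReach keywords low i := by
  unfold pvReach
  cases h : PySem.List.max?
      ((PySem.List.pyRange 1 (min 4 ((keywords.length : Int) - i) + 1) 1).filter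
        (fun k => (PySem.List.pyRange 2 (k + 1) 1).all (fun t => pvOkB keywords low i t)))
      (fun x => x) with
  | none => simp
  | some m =>
    have hm := PySem.List.max?_mem h
    have := (PySem.List.mem_pyRange_one).1 (List.mem_filter.1 hm).1
    simp only [Option.getD_some]
    omega

theorem pvTableB_one_le (keywords : List String) (low : String) :
    ∀ x ∈ pvTableB keywords low, 1 ≤ x := by
  intro x hx
  obtain ⟨i, _, rfl⟩ := List.mem_map.1 hx
  exact pvReach_one_le keywords low i

theorem pvGetD_one_le (l : List Int) (i : Int) (h : ∀ x ∈ l, 1 ≤ x) :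
    1 ≤ PySem.List.pyGetD l i 1 := by
  unfold PySem.List.pyGetD
  cases hx : PySem.List.pyGet? l i with
  | none => simp
  | some v =>
    have := h v (PySem.List.mem_of_pyGet?_eq_some _ hx)
    simpa using this

-- stage 2: 'while i < n: merged.append(' '.join(keywords[i:i+reach[i]])); i += reach[i]'
-- (the hypothesis h only justifies termination; reach[i] is in range whenever read)
def pvConsumeB (keywords : List String) (reach : List Int) (merged : List String) (i : Int)
    (h : ∀ x ∈ reach, 1 ≤ x) : List String :=
  if i < (keywords.length : Int) then
    let r := PySem.List.pyGetD reach i 1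
    pvConsumeB keywords reach
      (merged ++ [PySem.Str.join " " (PySem.List.slice keywords (some i) (some (i + r)))]) (i + r) h
  else merged
termination_by ((keywords.length : Int) - i).toNat
decreasing_by
  have := pvGetD_one_le reach i h
  omega

def merge_adjacent_keywords_py_alt (keywords : List String) (cot_text : String) : List String :=
  pvConsumeB keywords (pvTableB keywords (PySem.Str.lower cot_text)) [] 0
    (pvTableB_one_le keywords (PySem.Str.lower cot_text))

-- ===== PRECONDITION & SPEC =====
def Spec_merge_adjacent_keywords_py (keywords : List String) (cot_text : String) (out : List String) : Prop := out = merge_adjacent_keywords_py_alt keywords cot_text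
instance (keywords : List String) (cot_text : String) (out : List String) : Decidable (Spec_merge_adjacent_keywords_py keywords cot_text out) := by unfold Spec_merge_adjacent_keywords_py; infer_instance

-- ===== CLAIM (what is proved, stated in full; the proofs are below) =====
def Claim_equal_merge_adjacent_keywords_py : Prop := ∀ (keywords : List String) (cot_text : String), Dom_merge_adjacent_keywords_py keywords cot_text → Spec_merge_adjacent_keywords_py keywords cot_text (merge_adjacent_keywords_py keywords cot_text)

-- ===== LEMMAS AND PROOFS =====

-- Proof-only model of A's greedy run length: extend while the next prefix matches.
def pvExtendB (keywords : List String) (cot_lower : String) (i k : Int) : Int :=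
  if k < 4 ∧ i + k < (keywords.length : Int) ∧
      PySem.Str.isIn (PySem.Str.lower (PySem.Str.join " " (PySem.List.slice keywords (some i) (some (i + k + 1))))) cot_lower = true then
    pvExtendB keywords cot_lower i (k + 1)
  else k
termination_by (4 - k).toNat
decreasing_by omega

theorem pvExtendB_ge (keywords : List String) (cot_lower : String) (i k : Int) :
    k ≤ pvExtendB keywords cot_lower i k := by
  fun_induction pvExtendB with
  | case1 a _h ih => omega
  | case2 a _h => omega

-- Proof-only single sweep: the common form both loops are reduced to.
def pvLoopB (keywords : List String) (cot_lower : String) (merged : List String) (i : Int) : List String :=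
  if i < (keywords.length : Int) then
    let k := pvExtendB keywords cot_lower i 1
    pvLoopB keywords cot_lower
      (merged ++ [PySem.Str.join " " (PySem.List.slice keywords (some i) (some (i + k)))]) (i + k)
  else merged
termination_by ((keywords.length : Int) - i).toNat
decreasing_by
  have := pvExtendB_ge keywords cot_lower i 1
  omega

theorem pvExtendB_stop (keywords : List String) (cot : String) (i k : Int)
    (h : ¬(k < 4 ∧ i + k < (keywords.length : Int))) : pvExtendB keywords cot i k = k := by
  rw [pvExtendB, if_neg]; tauto

theorem pvExtendB_le (keywords : List String) (cot : String) (i k : Int)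
    (hk : i + k ≤ (keywords.length : Int)) :
    i + pvExtendB keywords cot i k ≤ (keywords.length : Int) := by
  revert hk
  fun_induction pvExtendB with
  | case1 a h ih => intro _; exact ih (by omega)
  | case2 a h => intro hk; omega

theorem pvExtendB_le_four (keywords : List String) (cot : String) (i k : Int)
    (hk : k ≤ 4) : pvExtendB keywords cot i k ≤ 4 := by
  revert hk
  fun_induction pvExtendB with
  | case1 a h ih => intro _; exact ih (by omega)
  | case2 a h => intro hk; omega

theorem pvJoinSingle (s : String) : PySem.Str.join " " [s] = s := by
  simp [PySem.Str.join]

-- every prefix along the realised run matches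
theorem pvExtendB_chain (keywords : List String) (cot : String) (i k : Int) :
    ∀ t : Int, k < t → t ≤ pvExtendB keywords cot i k → pvOkB keywords cot i t = true := by
  fun_induction pvExtendB with
  | case1 a h ih =>
    intro t h1 h2
    by_cases ht : t = a + 1
    · subst ht
      have := h.2.2
      simpa [pvOkB, ← add_assoc] using this
    · exact ih t (by omega) h2
  | case2 a h =>
    intro t h1 h2
    omega

-- the loop stopped for a reason
theorem pvExtendB_halt (keywords : List String) (cot : String) (i k : Int) :
    ¬(pvExtendB keywords cot i k < 4 ∧ i + pvExtendB keywords cot i k < (keywords.length : Int) ∧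
      pvOkB keywords cot i (pvExtendB keywords cot i k + 1) = true) := by
  fun_induction pvExtendB with
  | case1 a h ih => exact ih
  | case2 a h =>
    intro hc
    exact h ⟨hc.1, hc.2.1, by simpa [pvOkB, ← add_assoc] using hc.2.2⟩

-- a filter that is everywhere false gives []
theorem pvFilterRangeNone (p : Int → Bool) (a b : Int)
    (hp : ∀ x, a ≤ x → x < b → p x = false) :
    (PySem.List.pyRange a b 1).filter p = [] := by
  apply List.filter_eq_nil_iff.2
  intro x hx
  have := PySem.List.mem_pyRange_one.1 hx
  simp [hp x this.1 this.2]

-- filter of an int range by a downward-closed predicate is an initial range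
theorem pvFilterRangeLe (p : Int → Bool) (c : Int) :
    ∀ (fuel : Nat) (a b : Int), (b - a).toNat ≤ fuel → a ≤ c + 1 → c + 1 ≤ b →
    (∀ x, a ≤ x → x < b → (p x = true ↔ x ≤ c)) →
    (PySem.List.pyRange a b 1).filter p = PySem.List.pyRange a (c + 1) 1 := by
  intro fuel
  induction fuel with
  | zero =>
    intro a b hf ha hb hp
    rw [PySem.List.pyRange_one_eq_nil (by omega), PySem.List.pyRange_one_eq_nil (by omega)]
    rfl
  | succ f ih =>
    intro a b hf ha hb hp
    by_cases hab : a < b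
    · rw [PySem.List.pyRange_one_cons hab]
      by_cases hac : a ≤ c
      · have hpa : p a = true := by rw [hp a (by omega) hab]; omega
        rw [List.filter_cons_of_pos hpa,
            ih (a + 1) b (by omega) (by omega) hb (fun x hx1 hx2 => hp x (by omega) hx2),
            PySem.List.pyRange_one_cons (show a < c + 1 by omega)]
      · have hpa : ¬ p a = true := by rw [hp a (by omega) hab]; omega
        rw [List.filter_cons_of_neg hpa,
            pvFilterRangeNone p (a + 1) b (fun x hx1 hx2 =>
              Bool.eq_false_iff.2 (fun hc => by rw [hp x (by omega) hx2] at hc; omega)),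
            PySem.List.pyRange_one_eq_nil (by omega)]
    · rw [PySem.List.pyRange_one_eq_nil (by omega), PySem.List.pyRange_one_eq_nil (by omega)]
      rfl
  
theorem pvFoldlMaxRange :
    ∀ (fuel : Nat) (a b x : Int), (b - a).toNat ≤ fuel → a < b →
      (PySem.List.pyRange a b 1).foldl max x = max x (b - 1) := by
  intro fuel
  induction fuel with
  | zero => intro a b x hf hab; omega
  | succ f ih =>
    intro a b x hf hab
    rw [PySem.List.pyRange_one_cons hab]
    by_cases h2 : a + 1 < b
    · rw [List.foldl_cons, ih (a + 1) b (max x a) (by omega) h2]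
      omega
    · rw [List.foldl_cons, PySem.List.pyRange_one_eq_nil (by omega)]
      simp only [List.foldl_nil]
      omega

theorem pvMaxRange (a b : Int) (hab : a < b) :
    PySem.List.max? (PySem.List.pyRange a b 1) (fun x => x) = some (b - 1) := by
  rw [PySem.List.pyRange_one_cons hab, PySem.List.max?_id_cons]
  by_cases h2 : a + 1 < b
  · rw [pvFoldlMaxRange (b - a - 1).toNat (a + 1) b a (by omega) h2]
    congr 1
    omega
  · rw [PySem.List.pyRange_one_eq_nil (by omega)]
    simp only [List.foldl_nil]
    congr 1
    omega

-- stage-1 entry = A's greedy run length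
theorem pvReach_eq (keywords : List String) (cot : String) (i : Int)
    (_h0 : 0 ≤ i) (hi : i < (keywords.length : Int)) :
    pvReach keywords cot i = pvExtendB keywords cot i 1 := by
  unfold pvReach
  set n : Int := (keywords.length : Int) with hn
  set M : Int := min 4 (n - i) with hM
  set K : Int := pvExtendB keywords cot i 1 with hK
  have hK1 : 1 ≤ K := hK ▸ pvExtendB_ge keywords cot i 1
  have hKM : K ≤ M := by
    have h4 := pvExtendB_le_four keywords cot i 1 (by omega)
    have hle := pvExtendB_le keywords cot i 1 (by omega)
    omega
  have hM1 : 1 ≤ M := by omega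
  have hQ : ∀ k, 1 ≤ k → k < M + 1 →
      (((PySem.List.pyRange 2 (k + 1) 1).all (fun t => pvOkB keywords cot i t)) = true ↔ k ≤ K) := by
    intro k hk1 hkM
    rw [List.all_eq_true]
    constructor
    · intro hall
      by_contra hgt
      have hKlt : K < k := by omega
      have hnot := pvExtendB_halt keywords cot i 1
      have hok : pvOkB keywords cot i (K + 1) = true := by
        have hmem : (K + 1) ∈ PySem.List.pyRange 2 (k + 1) 1 :=
          PySem.List.mem_pyRange_one.2 ⟨by omega, by omega⟩
        simpa using hall _ hmem
      exact hnot ⟨by omega, by omega, hok⟩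
    · intro hkK t hmem
      have ht := PySem.List.mem_pyRange_one.1 hmem
      simpa using pvExtendB_chain keywords cot i 1 t (by omega) (by omega)
  rw [pvFilterRangeLe _ K (M + 1 - 1).toNat 1 (M + 1) (by omega) (by omega) (by omega)
        (fun x hx1 hx2 => hQ x hx1 hx2),
      pvMaxRange 1 (K + 1) (by omega)]
  simp only [Option.getD_some]
  omega

-- stage 2 on the table is the common sweep
theorem pvConsume_eq_loop (keywords : List String) (cot : String)
    (h : ∀ x ∈ pvTableB keywords cot, 1 ≤ x) :
    ∀ (fuel : Nat) (i : Int) (merged : List String),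
      ((keywords.length : Int) - i).toNat ≤ fuel → 0 ≤ i →
      pvConsumeB keywords (pvTableB keywords cot) merged i h = pvLoopB keywords cot merged i := by
  intro fuel
  induction fuel with
  | zero =>
    intro i merged hf _h0
    rw [pvConsumeB, if_neg (by omega), pvLoopB, if_neg (by omega)]
  | succ f ih =>
    intro i merged hf h0
    by_cases hi : i < (keywords.length : Int)
    · rw [pvConsumeB, if_pos hi, pvLoopB, if_pos hi]
      have htab : PySem.List.pyGetD (pvTableB keywords cot) i 1 = pvReach keywords cot i := by
        unfold pvTableB
        exact PySem.List.pyGetD_map_pyRange_of_nonneg _ _ _ _ h0 hi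
      simp only [htab, pvReach_eq keywords cot i h0 hi]
      have hge := pvExtendB_ge keywords cot i 1
      exact ih (i + pvExtendB keywords cot i 1) _ (by omega) (by omega)
    · rw [pvConsumeB, if_neg hi, pvLoopB, if_neg hi]

-- the A-side inner loop computes exactly the greedy run
theorem inner_eq (keywords : List String) (cot : String) (skip : PySem.Set Int) (i : Int)
    (hsk : ∀ x ∈ skip, x < i) :
    ∀ (fuel : Nat) (k0 : Int), 1 ≤ k0 → (4 - k0).toNat ≤ fuel →
    pvInnerA keywords cot skip i
      (PySem.List.pyRange (i + k0) (min (i + 4) (keywords.length : Int)) 1)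
      (PySem.Str.join " " (PySem.List.slice keywords (some i) (some (i + k0))))
      (PySem.List.pyRange i (i + k0) 1)
    = (PySem.Str.join " " (PySem.List.slice keywords (some i) (some (i + pvExtendB keywords cot i k0))),
       PySem.List.pyRange i (i + pvExtendB keywords cot i k0) 1) := by
  intro fuel
  induction fuel with
  | zero =>
    intro k0 h1 h2
    rw [PySem.List.pyRange_one_eq_nil (by omega),
        pvExtendB_stop _ _ _ _ (by omega)]
    simp [pvInnerA]
  | succ f ih =>
    intro k0 h1 h2
    by_cases hlt : i + k0 < min (i + 4) (keywords.length : Int)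
    · rw [PySem.List.pyRange_one_cons hlt]
      have hcont : ¬ PySem.Set.contains skip (i + k0) = true := by
        intro hc
        have := hsk _ ((PySem.Set.contains_iff _ _).1 hc)
        omega
      rw [pvExtendB]
      simp only [pvInnerA]
      rw [if_neg hcont]
      by_cases hin : PySem.Str.isIn (PySem.Str.lower (PySem.Str.join " " (PySem.List.slice keywords (some i) (some (i + k0 + 1))))) cot = true
      · rw [if_pos hin, if_pos ⟨by omega, by omega, hin⟩]
        have hc1 : i + k0 + 1 = i + (k0 + 1) := by ring
        rw [hc1]
        exact ih (k0 + 1) (by omega) (by omega)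
      · rw [if_neg hin, if_neg (by intro hc; exact hin hc.2.2)]
    · rw [PySem.List.pyRange_one_eq_nil (by omega),
          pvExtendB_stop _ _ _ _ (by omega)]
      simp [pvInnerA]

-- the A-side outer loop, entered at index i with skip = {0,…,m-1}, equals the sweep from m
theorem outer_eq (keywords : List String) (cot : String) :
    ∀ (fuel : Nat) (i m : Int) (merged : List String) (skip : PySem.Set Int),
      ((keywords.length : Int) - i).toNat ≤ fuel → 0 ≤ i → i ≤ m → m ≤ (keywords.length : Int) →
      (∀ x : Int, x ∈ skip ↔ 0 ≤ x ∧ x < m) →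
      pvOuterA keywords cot (PySem.List.pyRange i (keywords.length : Int) 1) merged skip
        = pvLoopB keywords cot merged m := by
  intro fuel
  induction fuel with
  | zero =>
    intro i m merged skip hf h0 hi hm hskip
    rw [PySem.List.pyRange_one_eq_nil (by omega), pvLoopB, if_neg (by omega)]
    simp [pvOuterA]
  | succ f ih =>
    intro i m merged skip hf h0 hi hm hskip
    by_cases hin2 : i < (keywords.length : Int)
    · rw [PySem.List.pyRange_one_cons hin2]
      simp only [pvOuterA]
      by_cases him : i < m
      · rw [if_pos ((PySem.Set.contains_iff _ _).2 ((hskip _).2 ⟨by omega, by omega⟩))]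
        exact ih (i + 1) m merged skip (by omega) (by omega) (by omega) hm hskip
      · have him' : i = m := by omega
        subst him'
        rw [if_neg (fun hc => absurd ((hskip _).1 ((PySem.Set.contains_iff _ _).1 hc)) (by omega))]
        have hsk' : ∀ x ∈ skip, x < i := fun x hx => ((hskip x).1 hx).2
        -- initial best = ' '.join of the 1-element window
        have hbest0 : PySem.List.pyGetD keywords i ""
            = PySem.Str.join " " (PySem.List.slice keywords (some i) (some (i + 1))) := by
          have hsl : PySem.List.slice keywords (some i) (some (i + 1))
              = (keywords.drop i.toNat).take 1 := by
            rw [PySem.List.slice_toNat _ h0 (by omega)]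
            congr 1
            omega
          have hlt : i.toNat < keywords.length := by omega
          have h1 : keywords.drop i.toNat = keywords[i.toNat] :: keywords.drop (i.toNat + 1) :=
            List.drop_eq_getElem_cons hlt
          rw [hsl, h1, PySem.List.pyGetD_of_nonneg keywords "" h0]
          simp [List.take, pvJoinSingle, List.getD, List.getElem?_eq_getElem hlt]
        have hbidx : ([i] : List Int) = PySem.List.pyRange i (i + 1) 1 :=
          (PySem.List.pyRange_one_singleton i).symm
        rw [hbest0, hbidx, inner_eq keywords cot skip i hsk' 3 1 (by omega) (by omega)]
        dsimp only
        set K : Int := pvExtendB keywords cot i 1 with hK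
        have hK1 : (1 : Int) ≤ K := hK ▸ pvExtendB_ge _ _ _ 1
        have hKle : i + K ≤ (keywords.length : Int) := hK ▸ pvExtendB_le _ _ _ _ (by omega)
        -- the updated skip set is {0,…,i+K-1}
        have hskip' : ∀ x : Int, x ∈ PySem.Set.update skip (PySem.List.pyRange i (i + K) 1)
            ↔ 0 ≤ x ∧ x < i + K := by
          intro x
          rw [PySem.Set.update_eq_append_filter]
          constructor
          · intro hx
            rcases List.mem_append.1 hx with h | h
            · have := (hskip x).1 h
              omega
            · have hx2 := (List.mem_filter.1 h).1
              have := PySem.List.mem_pyRange_one.1 ((PySem.Set.mem_ofList _ _).1 hx2)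
              omega
          · rintro ⟨hx0, hxlt⟩
            apply List.mem_append.2
            by_cases hxm : x < i
            · exact Or.inl ((hskip x).2 ⟨hx0, hxm⟩)
            · right
              apply List.mem_filter.2
              refine ⟨(PySem.Set.mem_ofList _ _).2 (PySem.List.mem_pyRange_one.2 ⟨by omega, by omega⟩), ?_⟩
              have hnot : ¬ x ∈ skip := fun hmem => hxm ((hskip x).1 hmem).2
              simpa using hnot
        -- the sweep takes the same step
        rw [ih (i + 1) (i + K)
              (merged ++ [PySem.Str.join " " (PySem.List.slice keywords (some i) (some (i + K)))])
              _ (by omega) (by omega) (by omega) (by omega) hskip']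
        conv_rhs => rw [pvLoopB]
        rw [if_pos hin2]
    · have him' : i = m := by omega
      subst him'
      rw [PySem.List.pyRange_one_eq_nil (by omega), pvLoopB, if_neg (by omega)]
      simp [pvOuterA]

-- A reduces to the common sweep
theorem a_eq_loop (keywords : List String) (cot_text : String) :
    merge_adjacent_keywords_py keywords cot_text
      = pvLoopB keywords (PySem.Str.lower cot_text) [] 0 := by
  unfold merge_adjacent_keywords_py
  by_cases h : (keywords.length : Int) ≤ 1
  · rw [if_pos h]
    cases keywords with
    | nil => rw [pvLoopB]; simp
    | cons x tl =>
      have htl : tl = [] := by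
        cases tl with
        | nil => rfl
        | cons y ys => simp at h; omega
      subst htl
      rw [pvLoopB, if_pos (by simp), pvExtendB_stop _ _ _ _ (by simp)]
      show [x] = pvLoopB [x] (PySem.Str.lower cot_text)
        ([] ++ [PySem.Str.join " " (PySem.List.slice [x] (some 0) (some (0 + 1)))]) (0 + 1)
      rw [pvLoopB, if_neg (by simp)]
      norm_num [PySem.List.slice_toNat _ (by omega : (0:Int) ≤ 0) (by omega : (0:Int) ≤ 1)]
      simpa using (pvJoinSingle x).symm
  · rw [if_neg h]
    exact outer_eq keywords (PySem.Str.lower cot_text) keywords.length 0 0 [] PySem.Set.empty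
      (by omega) (by omega) (by omega) (by omega)
      (by intro x; simp [PySem.Set.empty])

-- ===== VERDICT (by name: the statement is the Claim_ definition above) =====
theorem merge_adjacent_keywords_py_spec : Claim_equal_merge_adjacent_keywords_py := by
  intro keywords cot_text _
  unfold Spec_merge_adjacent_keywords_py merge_adjacent_keywords_py_alt
  rw [a_eq_loop,
      pvConsume_eq_loop keywords (PySem.Str.lower cot_text) _ keywords.length 0 [] (by omega) (by omega)]
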